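-- pv_equiv track=rewrite | github.com/TuckerFaulk/hangman-project | run.py | hide_game_word
-- ===== SOURCE A (Python) =====
-- def hide_game_word(game_word):
--     """
--     Change the game word into dashes (-, letters) and slashes (/, spaces)
--     ready for the player to guess
--     """
--     game_word_split = list(game_word)
--
--     hide_word = []
--
--     for letter in game_word_split:
--         if letter != "/":
--             letter = "-"
--             hide_word.append(letter)
--         else:
--             hide_word.append("/")
--
--     hidden_game_word = ""
--
--     for letter in hide_word:
--         hidden_game_word += letter
--
--     return hidden_game_word
-- ===== SOURCE B (Python) =====
-- def hide_game_word(game_word):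
--     """
--     Change the game word into dashes (-, letters) and slashes (/, spaces)
--     ready for the player to guess
--     """
--     return "/".join("-" * len(seg) for seg in game_word.split("/"))
-- ===== Notes on version B (the rewrite author's own statement) =====
-- stated objective: simpler
-- what changed: Replaces the two explicit loops (per-character masking into a list, then repeated string concatenation) with a split on the slash separator, masking each segment as a dash-run of its length, joined back with slashes.
import Mathlib
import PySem

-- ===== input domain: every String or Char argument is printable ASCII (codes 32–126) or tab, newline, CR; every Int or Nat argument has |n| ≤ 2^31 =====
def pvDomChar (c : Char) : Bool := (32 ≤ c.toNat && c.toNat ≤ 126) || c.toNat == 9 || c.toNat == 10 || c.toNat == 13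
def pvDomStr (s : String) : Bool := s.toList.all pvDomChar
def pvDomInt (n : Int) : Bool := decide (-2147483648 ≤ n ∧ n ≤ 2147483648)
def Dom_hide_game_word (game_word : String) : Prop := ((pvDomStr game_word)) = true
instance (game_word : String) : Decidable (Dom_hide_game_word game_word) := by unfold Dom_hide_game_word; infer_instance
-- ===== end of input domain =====

-- B masks by splitting on '/' and joining dash-runs; A masks char by char — objective: simpler.
-- ===== PORT A =====
-- (Python string concatenation is ported over List Char, exact; the result is packed with String.ofList at the end.)
def hide_game_word (game_word : String) : String :=
  let game_word_split := game_word.toList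
  let hide_word : List Char := game_word_split.foldl
    (fun acc letter => if letter != '/' then acc ++ ['-'] else acc ++ ['/']) []
  let hidden_game_word : List Char := hide_word.foldl (fun acc letter => acc ++ [letter]) []
  String.ofList hidden_game_word

-- ===== PORT B =====
def hide_game_word_alt (game_word : String) : String :=
  PySem.Str.join "/"
    ((PySem.Chars.splitOn game_word.toList ['/']).map
      (fun seg => String.ofList (List.replicate seg.length '-')))

-- ===== PRECONDITION & SPEC =====
def Spec_hide_game_word (game_word : String) (out : String) : Prop := out = hide_game_word_alt game_word
instance (game_word : String) (out : String) : Decidable (Spec_hide_game_word game_word out) := by unfold Spec_hide_game_word; infer_instance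

-- ===== CLAIM (what is proved, stated in full; the proofs are below) =====
def Claim_equal_hide_game_word : Prop := ∀ (game_word : String), Dom_hide_game_word game_word → Spec_hide_game_word game_word (hide_game_word game_word)

-- ===== LEMMAS AND PROOFS =====
-- reference segment splitter: F l cur = the segments of l, the first one prefixed by cur.reverse
def pvF : List Char → List Char → List (List Char)
  | [], cur => [cur.reverse]
  | c :: rest, cur => if c = '/' then cur.reverse :: pvF rest [] else pvF rest (c :: cur)

def pvMask : Char → Char := fun c => if c != '/' then '-' else '/'

lemma pvF_ne_nil (l cur : List Char) : pvF l cur ≠ [] := by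
  induction l generalizing cur with
  | nil => simp [pvF]
  | cons c rest ih => simp only [pvF]; split <;> simp [ih]

lemma go_eq_pvF (l : List Char) : ∀ (fuel : Nat) (cur : List Char) (acc : List (List Char)),
    l.length ≤ fuel →
    PySem.Chars.splitOn.go ['/'] fuel l cur acc = acc.reverse ++ pvF l cur := by
  induction l with
  | nil =>
    intro fuel cur acc _
    cases fuel <;> simp [PySem.Chars.splitOn.go.eq_def, pvF]
  | cons c rest ih =>
    intro fuel cur acc h
    cases fuel with
    | zero => simp at h
    | succ f =>
      rw [PySem.Chars.splitOn.go.eq_def]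
      simp only []
      by_cases hc : c = '/'
      · subst hc
        rw [if_pos (by simp [List.isPrefixOf])]
        simp only [List.length_cons, List.length_nil, List.drop_succ_cons, List.drop_zero]
        rw [ih f [] (cur.reverse :: acc) (by simpa using Nat.le_of_succ_le_succ h)]
        simp [pvF]
      · rw [if_neg (by simp [List.isPrefixOf]; exact fun h' => hc h'.symm)]
        rw [ih f (c :: cur) acc (by simpa using Nat.le_of_succ_le_succ h)]
        simp [pvF, hc]

lemma splitOn_eq_pvF (cs : List Char) : PySem.Chars.splitOn cs ['/'] = pvF cs [] := by
  simpa using go_eq_pvF cs (cs.length + 1) [] [] (by omega)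

lemma join_cons_of_ne_nil (sep a : List Char) (parts : List (List Char)) (h : parts ≠ []) :
    PySem.Chars.join sep (a :: parts) = a ++ sep ++ PySem.Chars.join sep parts := by
  cases parts with
  | nil => exact absurd rfl h
  | cons b t => simp [PySem.Chars.join, List.intercalate, List.intersperse]

lemma join_pvF (l : List Char) : ∀ cur : List Char,
    PySem.Chars.join ['/'] ((pvF l cur).map (fun seg => List.replicate seg.length '-'))
      = List.replicate cur.length '-' ++ l.map pvMask := by
  induction l with
  | nil => intro cur; simp [pvF, PySem.Chars.join, List.intercalate]
  | cons c rest ih =>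
    intro cur
    by_cases hc : c = '/'
    · subst hc
      have hne : (pvF rest []).map (fun seg => List.replicate seg.length '-') ≠ [] := by
        simp [pvF_ne_nil]
      simp only [pvF, if_true, List.map_cons]
      rw [join_cons_of_ne_nil _ _ _ hne, ih []]
      simp [pvMask]
    · simp only [pvF, if_neg hc]
      rw [ih (c :: cur)]
      simp [pvMask, hc, List.replicate_succ']
  
lemma mask_step (acc : List Char) (letter : Char) :
    (if letter != '/' then acc ++ ['-'] else acc ++ ['/']) = acc ++ [pvMask letter] := by
  unfold pvMask; split <;> simp_all

lemma foldl_mask (l : List Char) : ∀ init : List Char,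
    l.foldl (fun acc letter => if letter != '/' then acc ++ ['-'] else acc ++ ['/']) init
      = init ++ l.map pvMask := by
  induction l with
  | nil => intro init; simp
  | cons c rest ih =>
    intro init
    rw [List.foldl_cons, mask_step, ih]
    simp

lemma foldl_id (l : List Char) : ∀ init : List Char,
    l.foldl (fun acc letter => acc ++ [letter]) init = init ++ l := by
  induction l with
  | nil => intro init; simp
  | cons c rest ih => intro init; simp [ih, List.append_assoc]

-- ===== VERDICT (by name: the statement is the Claim_ definition above) =====
theorem hide_game_word_spec : Claim_equal_hide_game_word := by
  intro game_word _
  unfold Spec_hide_game_word hide_game_word hide_game_word_alt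
  simp only [foldl_mask, foldl_id, List.nil_append, PySem.Str.join,
    splitOn_eq_pvF]
  congr 1
  have h := join_pvF game_word.toList []
  simp only [List.length_nil, List.replicate_zero, List.nil_append] at h
  rw [List.map_map]
  have hcomp : (String.toList ∘ fun seg : List Char => String.ofList (List.replicate seg.length '-'))
      = fun seg : List Char => List.replicate seg.length '-' := by
    funext seg; simp [String.toList_ofList]
  rw [hcomp, ← h]
  congr 1
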